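-- pv_equiv track=rewrite | github.com/sgvaidyas/C280Day12 | Operatorcheck.py | isoperCheck
-- ===== SOURCE A (Python) =====
-- def isoperCheck(s):
--     oper = "+-/^*"
--     closingbrac = ")]}"
--     openingbrac = "([{"
--     valid = True
--     for i in range(len(s)):
--         if i+1<len(s):
--             if (s[i] in oper) and (s[i+1] in oper):
--                 valid = False
--             elif(s[i].isalpha() and s[i+1].isalpha()):
--                 valid = False
--             elif s[-1] in oper:
--                 valid = False
--             elif(s[i] in closingbrac and s[i+1].isalpha()):
--                 valid = False
--             elif(s[i] in oper and s[i+1] in closingbrac):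
--                 valid = False
--             elif (s[i].isalpha() and s[i+1] in openingbrac):
--                 valid = False
--             if valid==False:
--                 return False
--     return valid
-- ===== SOURCE B (Python) =====
-- def isoperCheck(s):
--     OPS = "+-/^*"
--     # global invariant (mirrors the original's in-loop s[-1] check)
--     if len(s) >= 2 and s[-1] in OPS:
--         return False
--
--     def cat(c):
--         if c in OPS:
--             return 'o'
--         if c.isalpha():
--             return 'a'
--         if c in "([{":
--             return '('
--         if c in ")]}":
--             return ')'
--         return '.'
--
--     # stage 1: translate to the category alphabet; stage 2: forbidden-bigram substring tests
--     t = "".join(map(cat, s))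
--     return not any(b in t for b in ("oo", "aa", ")a", "o)", "a("))
-- ===== Notes on version B (the rewrite author's own statement) =====
-- stated objective: alternative
-- what changed: Replaces A's indexed scan with its six-branch elif chain (re-checking s[-1] every iteration) by a hoisted last-char guard, a translation of the string into a 5-letter category alphabet, and substring searches for the five forbidden category bigrams.
import Mathlib
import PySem

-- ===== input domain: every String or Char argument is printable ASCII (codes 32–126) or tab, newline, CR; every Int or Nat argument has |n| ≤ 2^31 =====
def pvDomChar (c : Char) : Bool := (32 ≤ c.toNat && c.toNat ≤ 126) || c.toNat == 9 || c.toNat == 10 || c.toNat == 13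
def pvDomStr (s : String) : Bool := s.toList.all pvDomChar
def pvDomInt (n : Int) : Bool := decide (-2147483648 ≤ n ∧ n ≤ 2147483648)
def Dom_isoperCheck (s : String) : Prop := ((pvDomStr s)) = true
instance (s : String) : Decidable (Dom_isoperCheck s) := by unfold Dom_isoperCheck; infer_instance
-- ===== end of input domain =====

-- B replaces A's indexed elif-chain scan by a hoisted last-char guard, a translation of the
-- string into a 5-letter category alphabet, and substring searches for the forbidden bigrams.

-- shared character predicates (exact on the printable-ASCII domain: Python isalpha = A-Z/a-z there)
def isOperC (c : Char) : Bool := c = '+' || c = '-' || c = '/' || c = '^' || c = '*'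
def isAlphaC (c : Char) : Bool := ('a' ≤ c && c ≤ 'z') || ('A' ≤ c && c ≤ 'Z')
def isCloseC (c : Char) : Bool := c = ')' || c = ']' || c = '}'
def isOpenC (c : Char) : Bool := c = '(' || c = '[' || c = '{'

-- ===== PORT A =====
-- the for-loop over range(len(s)), with early return on a failing branch
def isoperCheckGo (cs : List Char) (i : Nat) : Bool :=
  if i < cs.length then
    if i + 1 < cs.length then
      let si := cs.getD i ' '
      let si1 := cs.getD (i+1) ' '
      let valid :=
        if isOperC si && isOperC si1 then false
        else if isAlphaC si && isAlphaC si1 then false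
        else if isOperC (cs.getD (cs.length - 1) ' ') then false
        else if isCloseC si && isAlphaC si1 then false
        else if isOperC si && isCloseC si1 then false
        else if isAlphaC si && isOpenC si1 then false
        else true
      if valid = false then false else isoperCheckGo cs (i+1)
    else isoperCheckGo cs (i+1)
  else true
termination_by cs.length - i

def isoperCheck (s : String) : Bool := isoperCheckGo s.toList 0

-- ===== PORT B =====
-- category map: operator 'o', letter 'a', opening '(', closing ')', anything else '.'
def catC (c : Char) : Char :=
  if isOperC c then 'o'
  else if isAlphaC c then 'a'
  else if isOpenC c then '('
  else if isCloseC c then ')'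
  else '.'

-- the forbidden bigrams over the category alphabet
def bigramsB : List (List Char) := [['o','o'], ['a','a'], [')','a'], ['o',')'], ['a','(']]

def isoperCheck_alt (s : String) : Bool :=
  if 2 ≤ s.toList.length && isOperC (s.toList.getD (s.toList.length - 1) ' ') then false
  else
    -- t = "".join(map(cat, s)); then: not any(b in t for b in bigrams)
    !(bigramsB.any (fun b => PySem.Chars.isIn b (s.toList.map catC)))

-- ===== PRECONDITION & SPEC =====
def Spec_isoperCheck (s : String) (out : Bool) : Prop := out = isoperCheck_alt s
instance (s : String) (out : Bool) : Decidable (Spec_isoperCheck s out) := by unfold Spec_isoperCheck; infer_instance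

-- ===== CLAIM (what is proved, stated in full; the proofs are below) =====
def Claim_equal_isoperCheck : Prop := ∀ (s : String), Dom_isoperCheck s → Spec_isoperCheck s (isoperCheck s)

-- ===== LEMMAS AND PROOFS =====

-- A's pairwise branch chain (without the s[-1] branch), as one Boolean
def badPair (a b : Char) : Bool :=
  (isOperC a && isOperC b) || (isAlphaC a && isAlphaC b) || (isCloseC a && isAlphaC b)
    || (isOperC a && isCloseC b) || (isAlphaC a && isOpenC b)

theorem oper_not_alpha {c : Char} (h : isOperC c = true) : isAlphaC c = false := by
  simp only [isOperC, Bool.or_eq_true, decide_eq_true_eq] at h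
  rcases h with ((((rfl|rfl)|rfl)|rfl)|rfl) <;> decide

theorem close_cats {c : Char} (h : isCloseC c = true) :
    isOperC c = false ∧ isAlphaC c = false ∧ isOpenC c = false := by
  simp only [isCloseC, Bool.or_eq_true, decide_eq_true_eq] at h
  rcases h with ((rfl|rfl)|rfl) <;> exact ⟨by decide, by decide, by decide⟩

theorem open_cats {c : Char} (h : isOpenC c = true) :
    isOperC c = false ∧ isAlphaC c = false := by
  simp only [isOpenC, Bool.or_eq_true, decide_eq_true_eq] at h
  rcases h with ((rfl|rfl)|rfl) <;> exact ⟨by decide, by decide⟩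

theorem catC_o {c : Char} : catC c = 'o' ↔ isOperC c = true := by
  unfold catC; split_ifs with h1 h2 h3 h4 <;> simp_all

theorem catC_a {c : Char} : catC c = 'a' ↔ isAlphaC c = true := by
  unfold catC
  split_ifs with h1 h2 h3 h4
  · simp [oper_not_alpha h1]
  · simp [h2]
  · simp [(open_cats h3).2]
  · simp [(close_cats h4).2.1]
  · simp [h2]

theorem catC_open {c : Char} : catC c = '(' ↔ isOpenC c = true := by
  unfold catC
  split_ifs with h1 h2 h3 h4
  · constructor
    · intro h; exact absurd h (by decide)
    · intro ho; exact absurd h1 (by simp [(open_cats ho).1])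
  · constructor
    · intro h; exact absurd h (by decide)
    · intro ho; exact absurd h2 (by simp [(open_cats ho).2])
  · simp [h3]
  · simp [h3]
  · simp [h3]

theorem catC_close {c : Char} : catC c = ')' ↔ isCloseC c = true := by
  unfold catC
  split_ifs with h1 h2 h3 h4
  · constructor
    · intro h; exact absurd h (by decide)
    · intro hc; exact absurd h1 (by simp [(close_cats hc).1])
  · constructor
    · intro h; exact absurd h (by decide)
    · intro hc; exact absurd h2 (by simp [(close_cats hc).2.1])
  · constructor
    · intro h; exact absurd h (by decide)
    · intro hc; exact absurd h3 (by simp [(close_cats hc).2.2])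
  · simp [h4]
  · simp [h4]

-- a two-character substring occurs iff some adjacent pair is exactly it
theorem infix_pair (x y : Char) (l : List Char) :
    [x, y] <:+: l ↔ ∃ p ∈ l.zip l.tail, p.1 = x ∧ p.2 = y := by
  induction l with
  | nil => simp
  | cons a rest ih =>
    rw [List.infix_cons_iff]
    cases rest with
    | nil =>
      simp only [List.tail_cons, List.zip_nil_right, List.not_mem_nil, false_and,
        exists_false, iff_false, not_or]
      constructor
      · intro h
        rcases h with ⟨t, ht⟩
        cases ht
      · intro h
        rcases h with ⟨s, t, ht⟩
        have := congrArg List.length ht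
        simp at this
    | cons b t =>
      simp only [List.tail_cons, List.zip_cons_cons, List.mem_cons]
      rw [ih]
      constructor
      · rintro (hp | hi)
        · rw [List.cons_prefix_cons, List.cons_prefix_cons] at hp
          exact ⟨(a, b), Or.inl rfl, hp.1.symm, hp.2.1.symm⟩
        · rcases hi with ⟨p, hp, hxy⟩
          exact ⟨p, Or.inr hp, hxy⟩
      · rintro ⟨p, (hp | hp), hxy⟩
        · subst hp
          left
          rw [List.cons_prefix_cons, List.cons_prefix_cons]
          exact ⟨hxy.1.symm, hxy.2.symm, List.nil_prefix⟩
        · right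
          exact ⟨p, hp, hxy⟩

theorem isIn_pair (x y : Char) (l : List Char) :
    PySem.Chars.isIn [x, y] l
      = (l.zip l.tail).any (fun p => decide (p.1 = x) && decide (p.2 = y)) := by
  rw [Bool.eq_iff_iff, PySem.Chars.isIn_iff_infix, infix_pair]
  simp [List.any_eq_true]

theorem any_or_split {a : Type} (l : List a) (f g : a → Bool) :
    (l.any f || l.any g) = l.any (fun x => f x || g x) := by
  rw [Bool.eq_iff_iff]
  simp only [Bool.or_eq_true, List.any_eq_true]
  constructor
  · rintro (⟨x, hx, hf⟩ | ⟨x, hx, hgx⟩)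
    · exact ⟨x, hx, Or.inl hf⟩
    · exact ⟨x, hx, Or.inr hgx⟩
  · rintro ⟨x, hx, (hf | hgx)⟩
    · exact Or.inl ⟨x, hx, hf⟩
    · exact Or.inr ⟨x, hx, hgx⟩

theorem dec_catC_o (c : Char) : decide (catC c = 'o') = isOperC c := by
  rw [Bool.eq_iff_iff]; simp [catC_o]

theorem dec_catC_a (c : Char) : decide (catC c = 'a') = isAlphaC c := by
  rw [Bool.eq_iff_iff]; simp [catC_a]

theorem dec_catC_open (c : Char) : decide (catC c = '(') = isOpenC c := by
  rw [Bool.eq_iff_iff]; simp [catC_open]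

theorem dec_catC_close (c : Char) : decide (catC c = ')') = isCloseC c := by
  rw [Bool.eq_iff_iff]; simp [catC_close]

theorem isIn_pair_map (x y : Char) (cs : List Char) :
    PySem.Chars.isIn [x, y] (cs.map catC)
      = (cs.zip cs.tail).any (fun p => decide (catC p.1 = x) && decide (catC p.2 = y)) := by
  rw [isIn_pair]
  rw [show (cs.map catC).zip (cs.map catC).tail
      = (cs.zip cs.tail).map (Prod.map catC catC) by rw [← List.map_tail, List.zip_map]]
  rw [List.any_map]
  simp only [Function.comp_def, Prod.map]
  rfl

theorem anyBigrams (cs : List Char) :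
    bigramsB.any (fun b => PySem.Chars.isIn b (cs.map catC))
      = (cs.zip cs.tail).any (fun p => badPair p.1 p.2) := by
  simp only [bigramsB, List.any_cons, List.any_nil, Bool.or_false, isIn_pair_map,
    any_or_split]
  congr 1
  funext p
  simp only [dec_catC_o, dec_catC_a, dec_catC_open, dec_catC_close, badPair]
  simp [Bool.or_assoc]

theorem valid_chain_eq (cs : List Char) (si si1 : Char)
    (hlast : isOperC (cs.getD (cs.length - 1) ' ') = false) :
    (if isOperC si && isOperC si1 then false
      else if isAlphaC si && isAlphaC si1 then false
      else if isOperC (cs.getD (cs.length - 1) ' ') then false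
      else if isCloseC si && isAlphaC si1 then false
      else if isOperC si && isCloseC si1 then false
      else if isAlphaC si && isOpenC si1 then false
      else true) = !badPair si si1 := by
  cases h1 : (isOperC si && isOperC si1) <;>
    cases h2 : (isAlphaC si && isAlphaC si1) <;>
      cases h3 : (isCloseC si && isAlphaC si1) <;>
        cases h4 : (isOperC si && isCloseC si1) <;>
          cases h5 : (isAlphaC si && isOpenC si1) <;>
            simp [badPair, h1, h2, h3, h4, h5, List.getD_eq_getElem?_getD ▸ hlast,
              List.getD_eq_getElem?_getD]

theorem go_eq_all (cs : List Char) (i : Nat)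
    (hlast : isOperC (cs.getD (cs.length - 1) ' ') = false) :
    isoperCheckGo cs i
      = ((cs.drop i).zip (cs.drop (i+1))).all (fun p => !badPair p.1 p.2) := by
  by_cases hi : i < cs.length
  · by_cases hi1 : i + 1 < cs.length
    · rw [isoperCheckGo]
      simp only [hi, hi1, if_pos]
      rw [valid_chain_eq cs _ _ hlast,
        List.getD_eq_getElem cs ' ' hi, List.getD_eq_getElem cs ' ' hi1]
      have hz : (cs.drop i).zip (cs.drop (i+1))
          = (cs[i], cs[i+1]) :: ((cs.drop (i+1)).zip (cs.drop (i+1+1))) := by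
        conv_lhs => rw [List.drop_eq_getElem_cons hi]
        conv_lhs => rw [List.drop_eq_getElem_cons hi1]
        rw [List.zip_cons_cons]
        rw [List.drop_eq_getElem_cons hi1]
      rw [hz, List.all_cons]
      by_cases hb : badPair cs[i] cs[i+1] = true
      · simp [hb]
      · simp only [Bool.not_eq_true] at hb
        simp [hb, go_eq_all cs (i+1) hlast]
    · have hnil : cs.drop (i+1) = [] := List.drop_eq_nil_of_le (by omega)
      rw [isoperCheckGo]
      simp only [hi, if_pos, hi1, if_false]
      rw [go_eq_all cs (i+1) hlast, hnil]
      simp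
  · have h1 : cs.drop i = [] := List.drop_eq_nil_of_le (by omega)
    rw [isoperCheckGo]
    simp [hi, h1]
termination_by cs.length - i

theorem go_false_of_oplast (cs : List Char) (h2 : 2 ≤ cs.length)
    (hlast : isOperC (cs.getD (cs.length - 1) ' ') = true) :
    isoperCheckGo cs 0 = false := by
  have h0 : 0 < cs.length := by omega
  have h1 : 0 + 1 < cs.length := by omega
  have hv : (if isOperC (cs.getD 0 ' ') && isOperC (cs.getD (0+1) ' ') then false
      else if isAlphaC (cs.getD 0 ' ') && isAlphaC (cs.getD (0+1) ' ') then false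
      else if isOperC (cs.getD (cs.length - 1) ' ') then false
      else if isCloseC (cs.getD 0 ' ') && isAlphaC (cs.getD (0+1) ' ') then false
      else if isOperC (cs.getD 0 ' ') && isCloseC (cs.getD (0+1) ' ') then false
      else if isAlphaC (cs.getD 0 ' ') && isOpenC (cs.getD (0+1) ' ') then false
      else true) = false := by
    split_ifs <;> simp_all
  rw [isoperCheckGo, if_pos h0, if_pos h1]
  simp only [hv]
  simp

-- ===== VERDICT (by name: the statement is the Claim_ definition above) =====
theorem isoperCheck_spec : Claim_equal_isoperCheck := by
  intro s _
  unfold Spec_isoperCheck isoperCheck isoperCheck_alt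
  generalize s.toList = cs
  by_cases hg : (decide (2 ≤ cs.length) && isOperC (cs.getD (cs.length - 1) ' ')) = true
  · rw [if_pos hg]
    simp only [Bool.and_eq_true, decide_eq_true_eq] at hg
    exact go_false_of_oplast cs hg.1 hg.2
  · rw [if_neg hg]
    by_cases h2 : 2 ≤ cs.length
    · have hlast : isOperC (cs.getD (cs.length - 1) ' ') = false := by
        simp [h2] at hg; exact hg
      rw [go_eq_all cs 0 hlast, anyBigrams]
      simp only [List.drop_zero, Nat.zero_add, List.drop_one]
      rw [Bool.eq_iff_iff]
      simp [List.all_eq_true]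
    · rcases cs with _ | ⟨a, _ | ⟨b, t⟩⟩
      · simp [isoperCheckGo, bigramsB, isIn_pair]
      · rw [isoperCheckGo]
        norm_num
        rw [isoperCheckGo]
        norm_num
        simp [bigramsB, isIn_pair]
      · exfalso
        apply h2
        simp
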